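-- pv_equiv track=rewrite | github.com/vbenjs/vue-vben-admin | .agent/.shared/ui-ux-pro-max/scripts/design_system.py | _select_best_match
-- ===== SOURCE A (Python) =====
-- def _select_best_match(results: list, priority_keywords: list) -> dict:
--     """Select best matching result based on priority keywords."""
--     if not results:
--         return {}
--
--     if not priority_keywords:
--         return results[0]
--
--     # First: try exact style name match
--     for priority in priority_keywords:
--         priority_lower = priority.lower().strip()
--         for result in results:
--             style_name = result.get("Style Category", "").lower()
--             if priority_lower in style_name or style_name in priority_lower:
--                 return result
--
--     # Second: score by keyword match in all fields
--     scored = []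
--     for result in results:
--         result_str = str(result).lower()
--         score = 0
--         for kw in priority_keywords:
--             kw_lower = kw.lower().strip()
--             # Higher score for style name match
--             if kw_lower in result.get("Style Category", "").lower():
--                 score += 10
--             # Lower score for keyword field match
--             elif kw_lower in result.get("Keywords", "").lower():
--                 score += 3
--             # Even lower for other field matches
--             elif kw_lower in result_str:
--                 score += 1
--         scored.append((score, result))
--
--     scored.sort(key=lambda x: x[0], reverse=True)
--     return scored[0][1] if scored and scored[0][0] > 0 else results[0]
-- ===== SOURCE B (Python) =====
-- def _select_best_match(results: list, priority_keywords: list) -> dict: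
--     """Select best matching result based on priority keywords."""
--     if not results:
--         return {}
--     if not priority_keywords:
--         return results[0]
--
--     wanted = [p.lower().strip() for p in priority_keywords]
--
--     # One fused pass over results: track (a) the result whose style name exactly
--     # matches the highest-priority keyword (smallest keyword index, first result
--     # wins ties) and (b) the first result with the maximal score.
--     best_exact = None   # (keyword index, result)
--     best_score = None   # (score, result)
--     for result in results:
--         name = result.get("Style Category", "").lower()
--         rank = next((i for i, w in enumerate(wanted) if w in name or name in w), None)
--         if rank is not None and (best_exact is None or rank < best_exact[0]):
--             best_exact = (rank, result)
--         kws = result.get("Keywords", "").lower()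
--         blob = str(result).lower()
--         score = 0
--         for w in wanted:
--             if w in name:
--                 score += 10
--             elif w in kws:
--                 score += 3
--             elif w in blob:
--                 score += 1
--         if best_score is None or score > best_score[0]:
--             best_score = (score, result)
--
--     if best_exact is not None:
--         return best_exact[1]
--     return best_score[1] if best_score[0] > 0 else results[0]
-- ===== Notes on version B (the rewrite author's own statement) =====
-- stated objective: alternative
-- what changed: A's two staged passes (keyword-outer exact-match scan with early return, then a scored list that is stable-sorted in reverse) are fused into one pass over the results that computes, per result, the index of its first exactly-matching keyword and its score, and tracks the leftmost result of minimal exact rank together with the first result of maximal score in running accumulators; B trades A's phase-1 early return for the single full pass, so it can do more work when A's first keyword hits early.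
import Mathlib
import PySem

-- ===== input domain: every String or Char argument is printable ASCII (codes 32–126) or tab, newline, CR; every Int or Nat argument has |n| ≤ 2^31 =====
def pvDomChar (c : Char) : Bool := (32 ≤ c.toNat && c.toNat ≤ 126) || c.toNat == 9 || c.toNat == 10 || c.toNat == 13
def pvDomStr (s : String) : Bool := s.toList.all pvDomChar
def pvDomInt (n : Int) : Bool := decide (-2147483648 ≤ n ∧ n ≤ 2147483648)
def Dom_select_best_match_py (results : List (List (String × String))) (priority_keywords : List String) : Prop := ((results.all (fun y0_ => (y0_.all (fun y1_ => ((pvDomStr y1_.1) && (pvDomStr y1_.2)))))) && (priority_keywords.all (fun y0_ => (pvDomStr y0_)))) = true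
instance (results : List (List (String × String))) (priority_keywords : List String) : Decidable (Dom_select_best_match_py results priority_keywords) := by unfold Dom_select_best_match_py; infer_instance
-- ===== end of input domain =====

-- B fuses A's two staged passes into ONE pass over the results: per result it computes the
-- index of the first exactly-matching keyword and the score, and tracks the leftmost result
-- of minimal exact rank plus the first result of maximal score with running accumulators,
-- instead of A's keyword-outer exact scan followed by a scored list and a stable reverse sort.
-- Objective: alternative decomposition; no speed claim.

-- ===== PORT A =====
-- Hand port of Python's str() on a dict with string keys/values (PySem has no repr):
-- exact on the Dom alphabet (printable ASCII plus tab/newline/CR): backslash and the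
-- chosen quote are backslash-escaped, tab/CR/newline print as \t / \r / \n, quotes are
-- single unless the string contains a single quote and no double quote.
def pyReprEscape (q : Char) (c : Char) : List Char :=
  if c = '\\' ∨ c = q then ['\\', c]
  else if c = Char.ofNat 9 then ['\\', 't']
  else if c = Char.ofNat 13 then ['\\', 'r']
  else if c = Char.ofNat 10 then ['\\', 'n']
  else [c]

def pyReprStr (s : List Char) : List Char :=
  let q : Char := if s.contains '\'' ∧ ¬ s.contains '"' then '"' else '\''
  q :: s.flatMap (pyReprEscape q) ++ [q]

def pyReprDict (r : List (String × String)) : List Char :=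
  '{' :: (List.intercalate [',', ' ']
    (r.map (fun kv => pyReprStr kv.1.toList ++ ':' :: ' ' :: pyReprStr kv.2.toList))) ++ ['}']

-- A's inner loop of the exact-match phase: first result whose style name matches.
def pvFindHit_a (pl : String) : List (List (String × String)) → Option (List (String × String))
  | [] => none
  | r :: rs =>
    if PySem.Str.isIn pl (PySem.Str.lower (PySem.Dict.getD (PySem.Dict.mk r) "Style Category" "")) ||
       PySem.Str.isIn (PySem.Str.lower (PySem.Dict.getD (PySem.Dict.mk r) "Style Category" "")) pl
    then some r else pvFindHit_a pl rs

-- A's outer loop of the exact-match phase (early return).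
def pvPhase1_a (results : List (List (String × String))) : List String → Option (List (String × String))
  | [] => none
  | p :: ps =>
    match pvFindHit_a (PySem.Str.strip (PySem.Str.lower p)) results with
    | some r => some r
    | none => pvPhase1_a results ps

-- A's per-result score accumulator loop over priority_keywords.
def pvScore_a (priority_keywords : List String) (result : List (String × String)) : Int :=
  let resultStr := PySem.Chars.lower (pyReprDict result)
  priority_keywords.foldl (fun score kw =>
    let kwLower := PySem.Str.strip (PySem.Str.lower kw)
    if PySem.Str.isIn kwLower (PySem.Str.lower (PySem.Dict.getD (PySem.Dict.mk result) "Style Category" "")) then score + 10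
    else if PySem.Str.isIn kwLower (PySem.Str.lower (PySem.Dict.getD (PySem.Dict.mk result) "Keywords" "")) then score + 3
    else if PySem.Chars.isIn kwLower.toList resultStr then score + 1
    else score) 0

def select_best_match_py (results : List (List (String × String))) (priority_keywords : List String) : List (String × String) :=
  if results = [] then []
  else if priority_keywords = [] then results.headD []
  else
    match pvPhase1_a results priority_keywords with
    | some r => r
    | none =>
      let scored := results.foldl (fun acc result => acc ++ [(pvScore_a priority_keywords result, result)]) []
      let sortedScored := PySem.List.sorted scored (fun x => x.1) true
      match sortedScored with
      | (s, r) :: _ => if 0 < s then r else results.headD []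
      | [] => results.headD []

-- ===== PORT B =====
-- B's per-result exact rank: index of the first keyword matching the style name
-- (port of next(i for i, w in enumerate(wanted) if w in name or name in w)).
def pvRank (name : String) : List String → Option Nat
  | [] => none
  | w :: ws =>
    if PySem.Str.isIn w name || PySem.Str.isIn name w then some 0
    else (pvRank name ws).map (· + 1)

-- B's per-result score loop over the precomputed keywords.
def pvScore_b (wanted : List String) (r : List (String × String)) : Int :=
  let name := PySem.Str.lower (PySem.Dict.getD (PySem.Dict.mk r) "Style Category" "")
  let kws := PySem.Str.lower (PySem.Dict.getD (PySem.Dict.mk r) "Keywords" "")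
  let blob := PySem.Chars.lower (pyReprDict r)
  wanted.foldl (fun score w =>
    if PySem.Str.isIn w name then score + 10
    else if PySem.Str.isIn w kws then score + 3
    else if PySem.Chars.isIn w.toList blob then score + 1
    else score) 0

-- One iteration of B's single loop: update both running accumulators.
def pvStep_b (wanted : List String)
    (st : Option (Nat × List (String × String)) × Option (Int × List (String × String)))
    (r : List (String × String)) :
    Option (Nat × List (String × String)) × Option (Int × List (String × String)) :=
  let name := PySem.Str.lower (PySem.Dict.getD (PySem.Dict.mk r) "Style Category" "")
  let bestExact :=
    match pvRank name wanted with
    | some k =>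
      match st.1 with
      | none => some (k, r)
      | some (k0, r0) => if k < k0 then some (k, r) else some (k0, r0)
    | none => st.1
  let score := pvScore_b wanted r
  let bestScore :=
    match st.2 with
    | none => some (score, r)
    | some (s0, m) => if s0 < score then some (score, r) else some (s0, m)
  (bestExact, bestScore)

def select_best_match_py_alt (results : List (List (String × String))) (priority_keywords : List String) : List (String × String) :=
  if results = [] then []
  else if priority_keywords = [] then results.headD []
  else
    let wanted := priority_keywords.map (fun p => PySem.Str.strip (PySem.Str.lower p))
    match results.foldl (pvStep_b wanted) (none, none) with
    | (some (_, r), _) => r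
    | (none, some (s, m)) => if 0 < s then m else results.headD []
    | (none, none) => results.headD []

-- ===== PRECONDITION & SPEC =====
-- A is total (no exception on any well-typed input), so no Pre_ is defined.
def Spec_select_best_match_py (results : List (List (String × String))) (priority_keywords : List String) (out : List (String × String)) : Prop := out = select_best_match_py_alt results priority_keywords
instance (results : List (List (String × String))) (priority_keywords : List String) (out : List (String × String)) : Decidable (Spec_select_best_match_py results priority_keywords out) := by unfold Spec_select_best_match_py; infer_instance

-- ===== CLAIM (what is proved, stated in full; the proofs are below) =====
def Claim_equal_select_best_match_py : Prop := ∀ (results : List (List (String × String))) (priority_keywords : List String), Dom_select_best_match_py results priority_keywords → Spec_select_best_match_py results priority_keywords (select_best_match_py results priority_keywords)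

-- ===== LEMMAS AND PROOFS =====

-- Abbreviations for the proofs (not used by the ports).
def pvName (r : List (String × String)) : String :=
  PySem.Str.lower (PySem.Dict.getD (PySem.Dict.mk r) "Style Category" "")

-- (rank, result) of one result, as an optional pair.
def pvRankPair (wanted : List String) (r : List (String × String)) : Option (Nat × List (String × String)) :=
  (pvRank (pvName r) wanted).map (fun k => (k, r))

-- Leftmost-minimum selection (left argument is the earlier one).
def pvCombine : Option (Nat × List (String × String)) → Option (Nat × List (String × String)) → Option (Nat × List (String × String))
  | none, b => b
  | some a, none => some a
  | some (ka, ra), some (kb, rb) => if kb < ka then some (kb, rb) else some (ka, ra)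

-- Right-recursive form of the running-minimum accumulator.
def pvGmin (wanted : List String) : List (List (String × String)) → Option (Nat × List (String × String))
  | [] => none
  | r :: rs => pvCombine (pvRankPair wanted r) (pvGmin wanted rs)

theorem pvCombine_assoc (a b c : Option (Nat × List (String × String))) :
    pvCombine (pvCombine a b) c = pvCombine a (pvCombine b c) := by
  rcases a with _ | ⟨ka, ra⟩ <;> rcases b with _ | ⟨kb, rb⟩ <;> rcases c with _ | ⟨kc, rc⟩ <;>
    simp only [pvCombine] <;> try (split_ifs <;> simp only [pvCombine] <;>
      try split_ifs) <;> first | rfl | (exfalso; omega)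

-- pvCombine commutes with shifting every rank by one.
theorem pvCombine_map_shift (a b : Option (Nat × List (String × String))) :
    pvCombine (a.map (fun p => (p.1 + 1, p.2))) (b.map (fun p => (p.1 + 1, p.2))) =
      (pvCombine a b).map (fun p => (p.1 + 1, p.2)) := by
  rcases a with _ | ⟨ka, ra⟩ <;> rcases b with _ | ⟨kb, rb⟩ <;>
    simp only [Option.map_none, Option.map_some, pvCombine] <;>
    (try split_ifs) <;> first | rfl | (exfalso; omega)

-- B's exact-rank component of the fold, isolated.
def pvStepE (wanted : List String)
    (st : Option (Nat × List (String × String))) (r : List (String × String)) :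
    Option (Nat × List (String × String)) :=
  pvCombine st (pvRankPair wanted r)

-- B's score component of the fold, isolated.
def pvStepS (wanted : List String)
    (st : Option (Int × List (String × String))) (r : List (String × String)) :
    Option (Int × List (String × String)) :=
  match st with
  | none => some (pvScore_b wanted r, r)
  | some (s0, m) => if s0 < pvScore_b wanted r then some (pvScore_b wanted r, r) else some (s0, m)

-- The pair fold splits into the two component folds.
theorem foldl_step_b_split (wanted : List String) (results : List (List (String × String)))
    (a : Option (Nat × List (String × String))) (b : Option (Int × List (String × String))) :
    results.foldl (pvStep_b wanted) (a, b) =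
      (results.foldl (pvStepE wanted) a, results.foldl (pvStepS wanted) b) := by
  induction results generalizing a b with
  | nil => rfl
  | cons r rs ih =>
    rw [List.foldl_cons, List.foldl_cons, List.foldl_cons]
    have hstep : pvStep_b wanted (a, b) r = (pvStepE wanted a r, pvStepS wanted b r) := by
      simp only [pvStep_b, pvStepE, pvStepS, pvRankPair, pvName]
      cases h : pvRank (PySem.Str.lower (PySem.Dict.getD (PySem.Dict.mk r) "Style Category" "")) wanted with
      | none => rcases a with _ | ⟨ka, ra⟩ <;> rcases b with _ | ⟨s0, m⟩ <;> simp [pvCombine]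
      | some k => rcases a with _ | ⟨ka, ra⟩ <;> rcases b with _ | ⟨s0, m⟩ <;> simp [pvCombine]
    rw [hstep, ih]

-- The left fold of pvStepE is pvCombine of the accumulator with the right-recursive minimum.
theorem foldl_stepE_eq (wanted : List String) (results : List (List (String × String)))
    (a : Option (Nat × List (String × String))) :
    results.foldl (pvStepE wanted) a = pvCombine a (pvGmin wanted results) := by
  induction results generalizing a with
  | nil => rcases a with _ | ⟨ka, ra⟩ <;> rfl
  | cons r rs ih =>
    rw [List.foldl_cons, pvGmin, ih]
    show pvCombine (pvCombine a (pvRankPair wanted r)) (pvGmin wanted rs) = _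
    rw [pvCombine_assoc]

-- With no keywords every rank is none.
theorem pvGmin_nil_kw (results : List (List (String × String))) :
    pvGmin [] results = none := by
  induction results with
  | nil => rfl
  | cons r rs ih => simp [pvGmin, pvRankPair, pvRank, pvCombine, ih]

-- If keyword w hits some result, the fused minimum for w :: ws is (0, first hit).
theorem pvGmin_cons_hit (w : String) (ws : List String)
    (results : List (List (String × String))) (r0 : List (String × String))
    (h : pvFindHit_a w results = some r0) :
    pvGmin (w :: ws) results = some (0, r0) := by
  induction results with
  | nil => cases h
  | cons r rs ih =>
    rw [pvFindHit_a] at h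
    by_cases hm : (PySem.Str.isIn w (PySem.Str.lower (PySem.Dict.getD (PySem.Dict.mk r) "Style Category" "")) ||
        PySem.Str.isIn (PySem.Str.lower (PySem.Dict.getD (PySem.Dict.mk r) "Style Category" "")) w) = true
    · rw [if_pos hm] at h
      cases h
      rw [pvGmin]
      have hrp : pvRankPair (w :: ws) r0 = some (0, r0) := by
        simp only [pvRankPair, pvName, pvRank]
        rw [if_pos hm]
        rfl
      rw [hrp]
      rcases pvGmin (w :: ws) rs with _ | ⟨kg, rg⟩
      · rfl
      · simp [pvCombine]
    · rw [if_neg hm] at h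
      rw [pvGmin, ih h]
      have hrp : pvRankPair (w :: ws) r = (pvRankPair ws r).map (fun p => (p.1 + 1, p.2)) := by
        simp only [pvRankPair, pvName, pvRank]
        rw [if_neg hm]
        cases pvRank (PySem.Str.lower (PySem.Dict.getD (PySem.Dict.mk r) "Style Category" "")) ws <;> rfl
      rw [hrp]
      rcases pvRankPair ws r with _ | ⟨kp, rp2⟩
      · rfl
      · simp only [Option.map_some, pvCombine]
        rw [if_pos (Nat.succ_pos kp)]

-- If keyword w hits no result, the fused minimum for w :: ws is the ws minimum, shifted.
theorem pvGmin_cons_miss (w : String) (ws : List String)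
    (results : List (List (String × String)))
    (h : pvFindHit_a w results = none) :
    pvGmin (w :: ws) results = (pvGmin ws results).map (fun p => (p.1 + 1, p.2)) := by
  induction results with
  | nil => rfl
  | cons r rs ih =>
    rw [pvFindHit_a] at h
    by_cases hm : (PySem.Str.isIn w (PySem.Str.lower (PySem.Dict.getD (PySem.Dict.mk r) "Style Category" "")) ||
        PySem.Str.isIn (PySem.Str.lower (PySem.Dict.getD (PySem.Dict.mk r) "Style Category" "")) w) = true
    · rw [if_pos hm] at h
      simp at h
    · rw [if_neg hm] at h
      have hrp : pvRankPair (w :: ws) r = (pvRankPair ws r).map (fun p => (p.1 + 1, p.2)) := by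
        simp only [pvRankPair, pvName, pvRank]
        rw [if_neg hm]
        cases pvRank (PySem.Str.lower (PySem.Dict.getD (PySem.Dict.mk r) "Style Category" "")) ws <;> rfl
      rw [pvGmin, pvGmin, ih h, hrp, pvCombine_map_shift]

-- A's keyword-outer exact phase equals the snd of B's fused leftmost-minimal rank.
theorem phase1_eq_gmin (results : List (List (String × String))) (pks : List String) :
    pvPhase1_a results pks =
      Option.map Prod.snd (pvGmin (pks.map (fun p => PySem.Str.strip (PySem.Str.lower p))) results) := by
  induction pks with
  | nil => simp [pvPhase1_a, pvGmin_nil_kw]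
  | cons p ps ih =>
    rw [pvPhase1_a, List.map_cons]
    cases hf : pvFindHit_a (PySem.Str.strip (PySem.Str.lower p)) results with
    | some r0 => rw [pvGmin_cons_hit _ _ _ _ hf]; rfl
    | none =>
      rw [pvGmin_cons_miss _ _ _ hf, ih, Option.map_map]
      cases pvGmin (ps.map (fun p => PySem.Str.strip (PySem.Str.lower p))) results <;> rfl

-- A's score accumulator (stripping each keyword in the loop) equals B's over precomputed keywords.
theorem score_eq (pks : List String) (r : List (String × String)) :
    pvScore_a pks r = pvScore_b (pks.map (fun p => PySem.Str.strip (PySem.Str.lower p))) r := by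
  simp only [pvScore_a, pvScore_b, List.foldl_map]

-- B's running best-score fold is max? over the (score, result) pairs.
theorem foldl_stepS_eq (wanted : List String) (results : List (List (String × String))) :
    results.foldl (pvStepS wanted) none =
      PySem.List.max? (results.map (fun r => (pvScore_b wanted r, r))) (fun x => x.1) := by
  unfold PySem.List.max?
  rw [List.foldl_map]
  apply PySem.List.foldl_congr_mem
  intro st r _
  cases st with
  | none => rfl
  | some p => obtain ⟨s0, m⟩ := p; rfl

-- Head of one insertBy step of the reverse sort, as a max step.
theorem head?_insertBy_step {α : Type} (key : α → Int) (x : α) (ys : List α) :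
    (PySem.List.insertBy (fun a b => decide (key b < key a)) x ys).head? =
      (match ys.head? with
       | none => some x
       | some m => if key m < key x then some x else some m) := by
  cases ys with
  | nil => rfl
  | cons y t =>
    simp only [PySem.List.insertBy, List.head?_cons]
    by_cases h : key y < key x
    · simp [h]
    · simp [h]

-- One more element under max? is one max step.
theorem max?_append_singleton {α : Type} (key : α → Int) (t : List α) (x : α) :
    PySem.List.max? (t ++ [x]) key =
      (match PySem.List.max? t key with
       | none => some x
       | some m => if key m < key x then some x else some m) := by
  have hsplit : PySem.List.max? (t ++ [x]) key =
      List.foldl (fun acc y =>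
        match acc with
        | none => some y
        | some m => if key m < key y then some y else some m) (PySem.List.max? t key) [x] := by
    unfold PySem.List.max?
    rw [List.foldl_append]
    rfl
  rw [hsplit, List.foldl_cons, List.foldl_nil]

-- Head of A's stable reverse insertion sort is the first maximum.
theorem sorted_head?_eq_max? {α : Type} (key : α → Int) (xs : List α) :
    (PySem.List.sorted xs key true).head? = PySem.List.max? xs key := by
  induction xs using List.reverseRecOn with
  | nil => rfl
  | append_singleton t x ih =>
    rw [PySem.List.sorted_rev_eq_foldl_insertBy, List.foldl_append, List.foldl_cons, List.foldl_nil,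
        head?_insertBy_step, ← PySem.List.sorted_rev_eq_foldl_insertBy, ih, max?_append_singleton]

-- max? of a nonempty list is some.
theorem max?_ne_none {α : Type} (f : α → Int) (r0 : α) (rs : List α) :
    ∃ m, PySem.List.max? (r0 :: rs) f = some m := by
  cases h : PySem.List.max? (r0 :: rs) f with
  | some m => exact ⟨m, rfl⟩
  | none =>
    have hs := sorted_head?_eq_max? f (r0 :: rs)
    rw [h, List.head?_eq_none_iff, PySem.List.sorted_eq_nil_iff] at hs
    cases hs

-- ===== VERDICT (by name: the statement is the Claim_ definition above) =====
theorem select_best_match_py_spec : Claim_equal_select_best_match_py := by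
  unfold Claim_equal_select_best_match_py
  intro results pks _
  unfold Spec_select_best_match_py select_best_match_py select_best_match_py_alt
  by_cases hres : results = []
  · simp [hres]
  · simp only [if_neg hres]
    by_cases hpk : pks = []
    · simp [hpk]
    · simp only [if_neg hpk]
      rw [foldl_step_b_split, foldl_stepE_eq, phase1_eq_gmin]
      cases hg : pvGmin (pks.map (fun p => PySem.Str.strip (PySem.Str.lower p))) results with
      | some p =>
        obtain ⟨k, r⟩ := p
        rfl
      | none =>
        simp only [Option.map_none, pvCombine]
        rw [PySem.List.foldl_append_singleton_eq_map
          (fun result => (pvScore_a pks result, result)) results []]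
        simp only [List.nil_append]
        have hsc : results.map (fun result => (pvScore_a pks result, result)) =
            results.map (fun r => (pvScore_b (pks.map (fun p => PySem.Str.strip (PySem.Str.lower p))) r, r)) := by
          apply List.map_congr_left; intro r _; rw [score_eq]
        rw [hsc, foldl_stepS_eq]
        obtain ⟨r0, rs, rfl⟩ : ∃ r0 rs, results = r0 :: rs := by
          cases results with
          | nil => exact absurd rfl hres
          | cons a t => exact ⟨a, t, rfl⟩
        obtain ⟨m, hm⟩ := max?_ne_none (fun x : Int × List (String × String) => x.1)
          ((pvScore_b (pks.map (fun p => PySem.Str.strip (PySem.Str.lower p))) r0, r0))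
          (rs.map (fun r => (pvScore_b (pks.map (fun p => PySem.Str.strip (PySem.Str.lower p))) r, r)))
        have hm' : PySem.List.max? ((r0 :: rs).map
            (fun r => (pvScore_b (pks.map (fun p => PySem.Str.strip (PySem.Str.lower p))) r, r)))
            (fun x => x.1) = some m := by
          rw [List.map_cons]; exact hm
        have hhead := sorted_head?_eq_max? (fun x : Int × List (String × String) => x.1)
          ((r0 :: rs).map (fun r => (pvScore_b (pks.map (fun p => PySem.Str.strip (PySem.Str.lower p))) r, r)))
        rw [hm'] at hhead
        cases hs : PySem.List.sorted ((r0 :: rs).map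
            (fun r => (pvScore_b (pks.map (fun p => PySem.Str.strip (PySem.Str.lower p))) r, r)))
            (fun x => x.1) true with
        | nil => rw [hs] at hhead; cases hhead
        | cons hd tl =>
          rw [hs] at hhead
          simp only [List.head?_cons, Option.some.injEq] at hhead
          rw [hm']
          obtain ⟨s, mr⟩ := m
          subst hhead
          rfl
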